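-- pv_equiv track=rewrite | github.com/QuantaFX/Codeforces | NOI TRAINING/main.py | solve_needle
-- ===== SOURCE A (Python) =====
-- def solve_needle(s, t):
--     # Core logic from your provided solution
--     t_sorted = sorted(list(t))
--     s_list = list(s)
--
--     # Check if s can be a subsequence of t
--     remaining_t = t_sorted[:]
--     for char in s_list:
--         if char in remaining_t:
--             remaining_t.remove(char)
--         else:
--             return "Impossible"
--
--     # Lexicographical Merge
--     res = []
--     i, j = 0, 0
--     t_rem = remaining_t
--     while i < len(s_list) or j < len(t_rem):
--         if i == len(s_list):
--             res.append(t_rem[j])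
--             j += 1
--         elif j == len(t_rem):
--             res.append(s_list[i])
--             i += 1
--         elif s_list[i] <= t_rem[j]:
--             res.append(s_list[i])
--             i += 1
--         else:
--             res.append(t_rem[j])
--             j += 1
--     return "".join(res)
-- ===== SOURCE B (Python) =====
-- def solve_needle(s, t):
--     # Count-based validation and remainder construction (no repeated list.remove scans),
--     # then a single forward merge emitting runs of remaining chars per s-char.
--     s_list = list(s)
--     t_list = list(t)
--     if any(s_list.count(c) > t_list.count(c) for c in set(s_list)):
--         return "Impossible"
--     rem = []
--     for c in sorted(set(t_list)):
--         rem += [c] * (t_list.count(c) - s_list.count(c))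
--     out = []
--     j = 0
--     for c in s_list:
--         while j < len(rem) and rem[j] < c:
--             out.append(rem[j])
--             j += 1
--         out.append(c)
--     out.extend(rem[j:])
--     return "".join(out)
-- ===== Notes on version B (the rewrite author's own statement) =====
-- stated objective: faster
-- what changed: A validates by repeatedly scanning and list.remove-ing each char of s from a sorted copy of t and then merges with a two-pointer loop; B validates with per-character counts, builds the sorted remainder directly from count differences over the sorted distinct characters of t, and merges by emitting the run of remaining chars below each s-char.
import Mathlib
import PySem

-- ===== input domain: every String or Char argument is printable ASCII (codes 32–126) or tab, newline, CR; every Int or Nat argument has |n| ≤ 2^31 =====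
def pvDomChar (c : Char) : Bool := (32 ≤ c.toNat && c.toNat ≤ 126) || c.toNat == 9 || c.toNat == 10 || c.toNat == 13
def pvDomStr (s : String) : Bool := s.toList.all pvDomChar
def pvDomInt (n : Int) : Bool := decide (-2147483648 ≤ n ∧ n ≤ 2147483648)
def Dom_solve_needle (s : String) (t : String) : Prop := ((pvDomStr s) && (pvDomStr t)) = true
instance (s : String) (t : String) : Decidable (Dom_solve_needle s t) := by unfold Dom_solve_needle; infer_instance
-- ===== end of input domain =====

-- B replaces A's quadratic remove-one-char-at-a-time validation by per-character counting
-- and builds the sorted remainder from counts; objective: faster (no inner list scans per char of s).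


-- ===== PORT A =====
-- the for-loop over s_list: membership test, then list.remove (first occurrence), early "Impossible" as none
def removeLoopA : List Char → List Char → Option (List Char)
  | [], rem => some rem
  | c :: cs, rem => if c ∈ rem then removeLoopA cs (rem.erase c) else none

-- the two-pointer while loop; the indices i, j become the unconsumed suffixes of s_list / t_rem
def mergeA : List Char → List Char → List Char
  | [], [] => []
  | [], b :: tt => b :: mergeA [] tt
  | a :: ss, [] => a :: mergeA ss []
  | a :: ss, b :: tt => if a ≤ b then a :: mergeA ss (b :: tt) else b :: mergeA (a :: ss) tt

def solve_needle (s : String) (t : String) : String :=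
  match removeLoopA s.toList (PySem.List.sorted t.toList (fun x => x) false) with
  | none => "Impossible"
  | some rem => String.ofList (mergeA s.toList rem)

-- ===== PORT B =====
-- the for-loop over s_list with inner while: j advances over the prefix of rem whose chars are < c
def mergeStepB (st : List Char × List Char) (c : Char) : List Char × List Char :=
  (st.1 ++ st.2.takeWhile (fun b => b < c) ++ [c], st.2.dropWhile (fun b => b < c))

def solve_needle_alt (s : String) (t : String) : String :=
  let sl := s.toList
  let tl := t.toList
  if (PySem.Set.ofList sl).any (fun c => tl.count c < sl.count c) then "Impossible"
  else
    -- [c] * (t_list.count(c) - s_list.count(c)): Nat subtraction, like Python's [c]*n, yields [] when the difference is ≤ 0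
    let rem := (PySem.List.sorted (PySem.Set.ofList tl) (fun x => x) false).foldl
      (fun r c => r ++ List.replicate (tl.count c - sl.count c) c) []
    let p := sl.foldl mergeStepB ([], rem)
    String.ofList (p.1 ++ p.2)

-- ===== PRECONDITION & SPEC =====
def Spec_solve_needle (s : String) (t : String) (out : String) : Prop := out = solve_needle_alt s t
instance (s : String) (t : String) (out : String) : Decidable (Spec_solve_needle s t out) := by unfold Spec_solve_needle; infer_instance

-- ===== CLAIM (what is proved, stated in full; the proofs are below) =====
def Claim_equal_solve_needle : Prop := ∀ (s : String) (t : String), Dom_solve_needle s t → Spec_solve_needle s t (solve_needle s t)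

-- ===== LEMMAS AND PROOFS =====

theorem removeLoopA_none_iff (cs rem : List Char) :
    removeLoopA cs rem = none ↔ ∃ c, rem.count c < cs.count c := by
  induction cs generalizing rem with
  | nil => simp [removeLoopA]
  | cons c cs ih =>
    by_cases hm : c ∈ rem
    · rw [removeLoopA]
      simp only [hm, if_true, ih]
      apply exists_congr
      intro w
      have hce : (rem.erase c).count w = rem.count w - if c == w then 1 else 0 :=
        List.count_erase
      have h1 : 1 ≤ rem.count c := List.one_le_count_iff.mpr hm
      by_cases hw : w = c
      · subst hw; simp only [List.count_cons_self]; rw [hce]; simp; omega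
      · rw [hce]; simp [Ne.symm hw]
    · rw [removeLoopA]
      simp only [hm, if_false, true_iff]
      exact ⟨c, by simp [List.count_eq_zero_of_not_mem hm]⟩

theorem removeLoopA_some_count (cs rem r : List Char)
    (h : removeLoopA cs rem = some r) : ∀ x, r.count x = rem.count x - cs.count x := by
  induction cs generalizing rem with
  | nil => simp [removeLoopA] at h; simp [h]
  | cons c cs ih =>
    rw [removeLoopA] at h
    by_cases hm : c ∈ rem
    · simp only [hm, if_true] at h
      intro x
      have := ih _ h x
      have hce : (rem.erase c).count x = rem.count x - if c == x then 1 else 0 :=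
        List.count_erase
      by_cases hx : x = c
      · subst hx; rw [this, hce]; simp [List.count_cons_self]; omega
      · rw [this, hce]; simp [Ne.symm hx]
    · simp [hm] at h

theorem removeLoopA_some_pairwise (cs rem r : List Char)
    (hs : rem.Pairwise (· ≤ ·)) (h : removeLoopA cs rem = some r) : r.Pairwise (· ≤ ·) := by
  induction cs generalizing rem with
  | nil => simp [removeLoopA] at h; exact h ▸ hs
  | cons c cs ih =>
    rw [removeLoopA] at h
    by_cases hm : c ∈ rem
    · simp only [hm, if_true] at h
      exact ih _ (hs.sublist List.erase_sublist) h
    · simp [hm] at h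

theorem count_flatMap_replicate (n : Char → Nat) (α : List Char) (hnd : α.Nodup) (x : Char) :
    (α.flatMap fun c => List.replicate (n c) c).count x = if x ∈ α then n x else 0 := by
  induction α with
  | nil => simp
  | cons a α ih =>
    have hnd' := hnd
    rw [List.nodup_cons] at hnd'
    rw [List.flatMap_cons, List.count_append, ih hnd'.2]
    by_cases hx : x = a
    · subst hx; simp [hnd'.1]
    · simp [List.count_replicate, hx, Ne.symm hx]

theorem pairwise_flatMap_replicate (n : Char → Nat) (α : List Char)
    (hp : α.Pairwise (· < ·)) :
    (α.flatMap fun c => List.replicate (n c) c).Pairwise (· ≤ ·) := by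
  induction α with
  | nil => simp
  | cons a α ih =>
    rw [List.pairwise_cons] at hp
    rw [List.flatMap_cons, List.pairwise_append]
    refine ⟨List.pairwise_replicate.mpr (Or.inr (le_refl a)), ih hp.2, ?_⟩
    intro x hx y hy
    rw [List.eq_of_mem_replicate hx]
    rcases List.mem_flatMap.mp hy with ⟨b, hb, hyb⟩
    rw [List.eq_of_mem_replicate hyb]
    exact le_of_lt (hp.1 b hb)

theorem mergeA_nil (rem : List Char) : mergeA [] rem = rem := by
  induction rem with
  | nil => simp [mergeA]
  | cons b tt ih => rw [mergeA, ih]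

theorem mergeA_cons (c : Char) (cs rem : List Char) :
    mergeA (c :: cs) rem =
      rem.takeWhile (fun b => b < c) ++ c :: mergeA cs (rem.dropWhile (fun b => b < c)) := by
  induction rem with
  | nil => simp [mergeA]
  | cons b tt ih =>
    by_cases h : c ≤ b
    · have : ¬ b < c := not_lt.mpr h
      rw [mergeA]
      simp [h, this]
    · have hb : b < c := lt_of_not_ge h
      rw [mergeA]
      simp [h, hb, ih]

theorem foldl_mergeStepB (cs : List Char) (acc rem : List Char) :
    (cs.foldl mergeStepB (acc, rem)).1 ++ (cs.foldl mergeStepB (acc, rem)).2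
      = acc ++ mergeA cs rem := by
  induction cs generalizing acc rem with
  | nil => simp [mergeA_nil]
  | cons c cs ih =>
    rw [List.foldl_cons]
    show ((cs.foldl mergeStepB (mergeStepB (acc, rem) c)).1 ++ _) = _
    rw [mergeStepB]
    simp only []
    rw [ih, mergeA_cons]
    simp

theorem solve_needle_agree (s t : String) : solve_needle s t = solve_needle_alt s t := by
  unfold solve_needle solve_needle_alt
  set sl := s.toList with hsl
  set tl := t.toList with htl
  have hTperm : (PySem.List.sorted tl (fun x => x) false).Perm tl :=
    PySem.List.sorted_perm tl (fun x => x) false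
  have hTcount : ∀ x, (PySem.List.sorted tl (fun x => x) false).count x = tl.count x :=
    fun x => hTperm.count_eq x
  have hTsorted : (PySem.List.sorted tl (fun x => x) false).Pairwise (· ≤ ·) :=
    PySem.List.sorted_pairwise tl (fun x => x)
  by_cases hg : (PySem.Set.ofList sl).any (fun c => tl.count c < sl.count c)
  · -- guard true: some char of s is over-represented; A's loop returns "Impossible"
    rcases List.any_eq_true.mp hg with ⟨c, _, hc⟩
    have : removeLoopA sl (PySem.List.sorted tl (fun x => x) false) = none := by
      rw [removeLoopA_none_iff]
      exact ⟨c, by rw [hTcount]; exact of_decide_eq_true hc⟩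
    rw [this]
    simp [hg]
  · -- guard false: A's loop succeeds and the two remainders coincide
    have hle : ∀ c, sl.count c ≤ tl.count c := by
      intro c
      by_contra hlt
      push Not at hlt
      have hcmem : c ∈ sl := List.one_le_count_iff.mp (by omega)
      exact hg (List.any_eq_true.mpr ⟨c, (PySem.Set.mem_ofList _ _).mpr hcmem, decide_eq_true hlt⟩)
    obtain ⟨r, hr⟩ : ∃ r, removeLoopA sl (PySem.List.sorted tl (fun x => x) false) = some r := by
      cases h : removeLoopA sl (PySem.List.sorted tl (fun x => x) false) with
      | none =>
        rcases (removeLoopA_none_iff _ _).mp h with ⟨c, hc⟩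
        rw [hTcount] at hc
        exact absurd (hle c) (by omega)
      | some r => exact ⟨r, rfl⟩
    rw [hr]
    simp only [hg]
    -- B's remainder as a flatMap
    set α := PySem.List.sorted (PySem.Set.ofList tl) (fun x => x) false with hα
    have hfold : α.foldl (fun r c => r ++ List.replicate (tl.count c - sl.count c) c) []
        = α.flatMap fun c => List.replicate (tl.count c - sl.count c) c := by
      rw [PySem.List.foldl_append_eq_flatMap]
      simp
    have hαlt : α.Pairwise (· < ·) := PySem.List.sorted_ofList_pairwise_lt tl
    have hαmem : ∀ x, x ∈ α ↔ x ∈ tl := by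
      intro x
      rw [hα, PySem.List.mem_sorted, PySem.Set.mem_ofList]
    -- the two remainders have the same counts and are both sorted, hence equal
    have hrcount := removeLoopA_some_count sl _ r hr
    have hBcount : ∀ x, (α.flatMap fun c => List.replicate (tl.count c - sl.count c) c).count x
        = tl.count x - sl.count x := by
      intro x
      rw [count_flatMap_replicate _ _ hαlt.nodup x]
      by_cases hx : x ∈ tl
      · simp [(hαmem x).mpr hx]
      · have h0 : tl.count x = 0 := List.count_eq_zero_of_not_mem hx
        simp [h0]
    have hperm : r.Perm (α.flatMap fun c => List.replicate (tl.count c - sl.count c) c) :=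
      List.perm_iff_count.mpr (fun x => by rw [hrcount x, hTcount x, hBcount x])
    have heq : r = α.flatMap fun c => List.replicate (tl.count c - sl.count c) c :=
      hperm.eq_of_pairwise' (removeLoopA_some_pairwise sl _ r hTsorted hr)
        (pairwise_flatMap_replicate _ α hαlt)
    rw [hfold, ← heq, foldl_mergeStepB]
    simp

-- ===== VERDICT (by name: the statement is the Claim_ definition above) =====
theorem solve_needle_spec : Claim_equal_solve_needle := by
  intro s t _
  unfold Spec_solve_needle
  exact solve_needle_agree s t
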